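-- pv_equiv track=rewrite | github.com/Adichapati/ARX | scripts/ui/ascii_assets.py | build_fade_frames
-- ===== SOURCE A (Python) =====
-- def _split_logo_lines(logo: str) -> list[str]:
--     return logo.split("\n") if logo else []
--
-- def build_fade_frames(logo: str) -> list[str]:
--     """Build a simple character-density fade-in effect."""
--     lines = _split_logo_lines(logo)
--     if not lines:
--         return [""]
--     full = "\n".join(lines)
--     # Phase 1: dots only
--     phase1 = "\n".join(
--         "".join("·" if c not in (" ", "\n") else c for c in line)
--         for line in lines
--     )
--     # Phase 2: block chars
--     phase2 = "\n".join(
--         "".join("░" if c not in (" ", "\n") else c for c in line)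
--         for line in lines
--     )
--     # Phase 3: medium blocks
--     phase3 = "\n".join(
--         "".join("▓" if c not in (" ", "\n") else c for c in line)
--         for line in lines
--     )
--     return [phase1, phase2, phase3, full]
-- ===== SOURCE B (Python) =====
-- def build_fade_frames(logo: str) -> list[str]:
--     """Build a simple character-density fade-in effect."""
--     if not logo:
--         return [""]
--     frames = ["".join(c if c in " \n" else g for c in logo) for g in "\u00b7\u2591\u2593"]
--     frames.append(logo)
--     return frames
-- ===== Notes on version B (the rewrite author's own statement) =====
-- stated objective: simpler
-- what changed: B drops the split/join round-trip entirely: it maps the replacement over the whole string once per glyph in a single data-driven loop over the glyph sequence and appends the original logo as the final frame, instead of three duplicated per-line comprehensions over split lines rejoined with newlines.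
import Mathlib
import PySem

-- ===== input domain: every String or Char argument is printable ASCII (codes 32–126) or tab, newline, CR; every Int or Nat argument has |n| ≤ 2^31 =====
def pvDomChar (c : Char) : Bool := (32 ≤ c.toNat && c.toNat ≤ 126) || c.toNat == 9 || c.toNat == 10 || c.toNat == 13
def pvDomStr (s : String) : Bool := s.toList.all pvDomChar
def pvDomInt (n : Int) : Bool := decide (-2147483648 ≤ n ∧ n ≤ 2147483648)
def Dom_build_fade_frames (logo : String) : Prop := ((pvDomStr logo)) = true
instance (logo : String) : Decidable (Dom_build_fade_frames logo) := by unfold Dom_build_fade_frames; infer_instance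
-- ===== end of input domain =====

-- B replaces A's three duplicated per-line comprehensions over split-then-rejoined lines by one
-- data-driven loop over the glyph string mapping the whole logo at once, appending the logo itself
-- as the final frame (objective: simpler).

-- ===== PORT A =====
-- helper _split_logo_lines: logo.split("\n") if logo else []
-- (PySem.Chars.splitOn is Python's str.split with a nonempty separator)
def split_logo_lines (logo : String) : List (List Char) :=
  if logo.toList ≠ [] then PySem.Chars.splitOn logo.toList ['\n'] else []

def build_fade_frames (logo : String) : List String :=
  let lines := split_logo_lines logo
  if lines = [] then [""]
  else
    let full := PySem.Chars.join ['\n'] lines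
    let phase1 := PySem.Chars.join ['\n']
      (lines.map (fun line => line.map (fun c => if c = ' ' ∨ c = '\n' then c else '·')))
    let phase2 := PySem.Chars.join ['\n']
      (lines.map (fun line => line.map (fun c => if c = ' ' ∨ c = '\n' then c else '░')))
    let phase3 := PySem.Chars.join ['\n']
      (lines.map (fun line => line.map (fun c => if c = ' ' ∨ c = '\n' then c else '▓')))
    [String.ofList phase1, String.ofList phase2, String.ofList phase3, String.ofList full]

-- ===== PORT B =====
def build_fade_frames_alt (logo : String) : List String :=
  if logo.toList = [] then [""]
  else
    ("·░▓".toList.map (fun g =>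
      String.ofList (logo.toList.map (fun c => if c = ' ' ∨ c = '\n' then c else g))))
    ++ [logo]

-- ===== PRECONDITION & SPEC =====
def Spec_build_fade_frames (logo : String) (out : List String) : Prop := out = build_fade_frames_alt logo
instance (logo : String) (out : List String) : Decidable (Spec_build_fade_frames logo out) := by unfold Spec_build_fade_frames; infer_instance

-- ===== CLAIM (what is proved, stated in full; the proofs are below) =====
def Claim_equal_build_fade_frames : Prop := ∀ (logo : String), Dom_build_fade_frames logo → Spec_build_fade_frames logo (build_fade_frames logo)

-- ===== LEMMAS AND PROOFS =====

theorem join_snoc (sep x : List Char) (xs : List (List Char)) :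
    PySem.Chars.join sep (xs ++ [x])
      = PySem.Chars.join sep xs ++ (if xs = [] then [] else sep) ++ x := by
  induction xs with
  | nil => simp [PySem.Chars.join, List.intercalate]
  | cons y t ih =>
      cases t with
      | nil => simp [PySem.Chars.join, List.intercalate]
      | cons z t' =>
          simp only [List.cons_append] at ih ⊢
          simp [PySem.Chars.join, List.intercalate] at ih ⊢
          simp [ih]

theorem go_zero (sep l cur : List Char) (acc : List (List Char)) :
    PySem.Chars.splitOn.go sep 0 l cur acc = ((cur.reverse ++ l) :: acc).reverse := rfl

theorem go_succ_nil (sep cur : List Char) (acc : List (List Char)) (fuel : Nat) :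
    PySem.Chars.splitOn.go sep (fuel + 1) [] cur acc = (cur.reverse :: acc).reverse := rfl

theorem go_succ_cons (sep cur : List Char) (acc : List (List Char)) (fuel : Nat) (c : Char)
    (rest : List Char) :
    PySem.Chars.splitOn.go sep (fuel + 1) (c :: rest) cur acc =
      (if sep.isPrefixOf (c :: rest) then
        PySem.Chars.splitOn.go sep fuel (List.drop sep.length (c :: rest)) [] (cur.reverse :: acc)
      else PySem.Chars.splitOn.go sep fuel rest (c :: cur) acc) := rfl

theorem go_join (sep : List Char) (hsep : sep ≠ []) :
    ∀ (fuel : Nat) (l cur : List Char) (acc : List (List Char)), l.length ≤ fuel →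
    PySem.Chars.join sep (PySem.Chars.splitOn.go sep fuel l cur acc)
      = PySem.Chars.join sep acc.reverse ++ (if acc = [] then [] else sep) ++ cur.reverse ++ l := by
  intro fuel
  induction fuel with
  | zero =>
      intro l cur acc _
      rw [go_zero,
        show ((cur.reverse ++ l) :: acc).reverse = acc.reverse ++ [cur.reverse ++ l] by simp,
        join_snoc]
      simp
  | succ fuel ih =>
      intro l cur acc h
      cases l with
      | nil =>
          rw [go_succ_nil,
            show (cur.reverse :: acc).reverse = acc.reverse ++ [cur.reverse] by simp, join_snoc]
          simp
      | cons c rest =>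
          rw [go_succ_cons]
          have hs : 1 ≤ sep.length := by
            cases sep with
            | nil => exact absurd rfl hsep
            | cons _ _ => simp
          simp only [List.length_cons] at h
          by_cases hp : sep.isPrefixOf (c :: rest) = true
          · rw [if_pos hp]
            rw [ih _ _ _ (by rw [List.length_drop]; simp only [List.length_cons]; omega)]
            have hpre : sep <+: (c :: rest) := List.isPrefixOf_iff_prefix.mp hp
            have hsd : sep ++ List.drop sep.length (c :: rest) = c :: rest := by
              obtain ⟨t, ht⟩ := hpre
              have hdt : List.drop sep.length (c :: rest) = t := by
                rw [← ht]; simp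
              rw [hdt, ht]
            rw [show ((cur.reverse :: acc).reverse) = acc.reverse ++ [cur.reverse] by simp,
              join_snoc]
            simp only [List.reverse_eq_nil_iff, List.cons_ne_nil, if_false, List.reverse_nil,
              List.append_nil, List.append_assoc]
            rw [hsd]
          · rw [if_neg hp]
            rw [ih _ _ _ (by omega)]
            simp

theorem join_splitOn (cs sep : List Char) (hsep : sep ≠ []) :
    PySem.Chars.join sep (PySem.Chars.splitOn cs sep) = cs := by
  unfold PySem.Chars.splitOn
  rw [go_join sep hsep _ _ _ _ (by omega)]
  simp [PySem.Chars.join, List.intercalate]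

theorem splitOn_ne_nil (cs sep : List Char) (hsep : sep ≠ []) :
    PySem.Chars.splitOn cs sep ≠ [] := by
  intro hnil
  have h1 := join_splitOn cs sep hsep
  rw [hnil] at h1
  simp [PySem.Chars.join, List.intercalate] at h1
  subst h1
  rw [show PySem.Chars.splitOn ([] : List Char) sep = [[]] from rfl] at hnil
  cases hnil

theorem map_join (f : Char → Char) (sep : List Char) (parts : List (List Char)) :
    (PySem.Chars.join sep parts).map f
      = PySem.Chars.join (sep.map f) (parts.map (List.map f)) := by
  induction parts with
  | nil => simp [PySem.Chars.join, List.intercalate]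
  | cons x t ih =>
      cases t with
      | nil => simp [PySem.Chars.join, List.intercalate]
      | cons y t' =>
          simp only [List.map_cons]
          simp [PySem.Chars.join, List.intercalate] at ih ⊢
          simp [ih]

-- one phase of A equals one frame of B: mapping the glyph over the joined lines
theorem phase_eq (cs : List Char) (g : Char) :
    PySem.Chars.join ['\n']
        ((PySem.Chars.splitOn cs ['\n']).map
          (List.map (fun c => if c = ' ' ∨ c = '\n' then c else g)))
      = cs.map (fun c => if c = ' ' ∨ c = '\n' then c else g) := by
  have hsep : (['\n'] : List Char).map (fun c => if c = ' ' ∨ c = '\n' then c else g) = ['\n'] := by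
    simp
  rw [← join_splitOn cs ['\n'] (by simp), map_join, hsep, join_splitOn cs ['\n'] (by simp)]

-- ===== VERDICT (by name: the statement is the Claim_ definition above) =====
theorem build_fade_frames_spec : Claim_equal_build_fade_frames := by
  intro logo _
  unfold Spec_build_fade_frames build_fade_frames build_fade_frames_alt split_logo_lines
  by_cases h : logo.toList = []
  · simp [h]
  · simp only [h, if_false, ne_eq, not_false_eq_true, if_true]
    rw [if_neg (splitOn_ne_nil _ _ (by simp))]
    rw [join_splitOn _ _ (by simp)]
    rw [show ("·░▓".toList) = ['·', '░', '▓'] by rfl]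
    simp only [List.map_cons, List.map_nil, List.cons_append, List.nil_append]
    rw [phase_eq logo.toList '·', phase_eq logo.toList '░', phase_eq logo.toList '▓']
    simp
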